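-- pv_equiv track=rewrite | github.com/kjh9267/BOJ_Python | 4.py | solution
-- ===== SOURCE A (Python) =====
-- def solution(needs, robot_count):
--     result = [0]
--     component_count = len(needs[0])
--     picked_robots = [False for _ in range(component_count)]
--
--     if robot_count > component_count:
--         return len(needs)
--
--     dfs(0, 0, needs, robot_count, component_count, picked_robots, result)
--
--     return result[0]
--
-- def dfs(cur, depth, needs, robot_count, component_count, picked_robots, result):
--     if depth == robot_count:
--         can_make_count = check_can_make_count(needs, picked_robots)
--         result[0] = max(result[0], can_make_count)
--         return
--
--     for index in range(cur, component_count):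
--         picked_robots[index] = True
--         dfs(index + 1, depth + 1, needs, robot_count, component_count, picked_robots, result)
--         picked_robots[index] = False
--
-- def check_can_make_count(needs, picked_robots):
--     count = 0
--
--     for need in needs:
--         if can_make(need, picked_robots):
--             count += 1
--
--     return count
--
-- def can_make(need, picked_robots):
--     not_need = 0
--
--     for component, is_need in enumerate(need):
--         if is_need == not_need:
--             continue
--         if not picked_robots[component]:
--             return False
--
--     return True
-- ===== SOURCE B (Python) =====
-- def solution(needs, robot_count):
--     m = len(needs[0])
--     if robot_count > m:
--         return len(needs)
--     masks = []
--     for need in needs: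
--         nm = 0
--         for i, v in enumerate(need):
--             if v:
--                 nm |= 1 << i
--         masks.append(nm)
--     best = 0
--     for s in range(1 << m):
--         if bin(s).count('1') != robot_count:
--             continue
--         covered = 0
--         for nm in masks:
--             if nm & s == nm:
--                 covered += 1
--         if covered > best:
--             best = covered
--     return best
-- ===== Notes on version B (the rewrite author's own statement) =====
-- stated objective: alternative
-- what changed: Replaces A's recursive DFS over size-k index combinations with a mutable picked list by a flat scan of all 2^m bitmasks filtered by popcount, precomputing one bitmask per need row so coverage becomes a single AND per row instead of an index-by-index walk.
import Mathlib
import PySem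

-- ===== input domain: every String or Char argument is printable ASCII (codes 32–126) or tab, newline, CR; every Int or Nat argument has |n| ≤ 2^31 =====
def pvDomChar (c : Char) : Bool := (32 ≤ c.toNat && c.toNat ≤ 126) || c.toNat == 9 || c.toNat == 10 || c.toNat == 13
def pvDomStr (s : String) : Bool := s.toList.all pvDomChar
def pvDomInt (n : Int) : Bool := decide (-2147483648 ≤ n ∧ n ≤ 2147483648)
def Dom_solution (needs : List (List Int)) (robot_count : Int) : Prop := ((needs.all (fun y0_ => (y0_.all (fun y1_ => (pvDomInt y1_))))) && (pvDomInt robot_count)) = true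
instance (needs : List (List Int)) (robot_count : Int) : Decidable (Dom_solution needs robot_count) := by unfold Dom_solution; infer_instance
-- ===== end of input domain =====

-- B replaces A's combination DFS over a mutable boolean list by a flat scan of all 2^m bitmasks
-- (popcount filter + bitwise submask coverage test); objective: alternative algorithm.

-- ===== PORT A =====
-- can_make: recursion over the row, threading the running index; picked_robots[component] is
-- pyGet?/getD: Python raises IndexError when component ≥ len(picked) (excluded by Pre_solution).
def canMakeA (picked : List Bool) : Nat → List Int → Bool
  | _, [] => true
  | i, v :: rest =>
    if v = 0 then canMakeA picked (i + 1) rest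
    else if picked.getD i false = false then false
    else canMakeA picked (i + 1) rest

def checkCanMakeCountA (needs : List (List Int)) (picked : List Bool) : Int :=
  needs.foldl (fun c need => if canMakeA picked 0 need then c + 1 else c) 0

-- dfs / its for-loop: the Python parameter `cur` is represented by the remaining index list
-- idxs = range(cur, component_count); the loop body's recursive call gets range(index+1, m),
-- which is exactly the tail of idxs, so the recursion is structural on idxs.
mutual
def dfsA (needs : List (List Int)) (k : Int) (depth : Int) (picked : List Bool) (res : Int) (idxs : List Nat) : Int :=
  if depth = k then max res (checkCanMakeCountA needs picked)
  else loopA needs k depth picked res idxs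
termination_by (idxs.length, 1)
def loopA (needs : List (List Int)) (k : Int) (depth : Int) (picked : List Bool) (res : Int) : (idxs : List Nat) → Int
  | [] => res
  | idx :: rest => loopA needs k depth picked (dfsA needs k (depth + 1) (picked.set idx true) res rest) rest
termination_by idxs => (idxs.length, 0)
end

def solution (needs : List (List Int)) (robot_count : Int) : Int :=
  let m := ((PySem.List.pyGet? needs 0).getD []).length   -- needs[0]: IndexError on [] (excluded by Pre_solution)
  if robot_count > (m : Int) then (needs.length : Int)
  else dfsA needs robot_count 0 (List.replicate m false) 0 (List.range' 0 m)

-- ===== PORT B =====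
-- nm = 0; for i, v in enumerate(need): if v: nm |= 1 << i
def rowMaskB (i : Nat) (nm : Nat) : List Int → Nat
  | [] => nm
  | v :: rest => rowMaskB (i + 1) (if v ≠ 0 then nm ||| 2 ^ i else nm) rest

-- bin(s).count('1')
def popcntB : Nat → Nat
  | 0 => 0
  | n + 1 => (n + 1) % 2 + popcntB ((n + 1) / 2)
decreasing_by exact Nat.div_lt_self (Nat.succ_pos n) (by omega)

def coveredB (masks : List Nat) (s : Nat) : Int :=
  masks.foldl (fun c nm => if nm &&& s = nm then c + 1 else c) 0

def solution_alt (needs : List (List Int)) (robot_count : Int) : Int :=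
  let m := ((PySem.List.pyGet? needs 0).getD []).length   -- needs[0]: IndexError on [] (excluded by Pre_solution)
  if robot_count > (m : Int) then (needs.length : Int)
  else
    let masks := needs.map (fun need => rowMaskB 0 0 need)
    (List.range (2 ^ m)).foldl
      (fun best s =>
        if (popcntB s : Int) ≠ robot_count then best
        else
          let covered := coveredB masks s
          if covered > best then covered else best) 0

-- ===== PRECONDITION & SPEC =====
-- Pre_solution holds exactly where Python A returns: needs must be nonempty (needs[0]), and when
-- 0 ≤ robot_count ≤ m the DFS must never index picked_robots out of range: a row whose first
-- nonzero entry at position ≥ m is reached (i.e. whose nonzero entries among the first m can all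
-- be picked with robot_count robots) would raise IndexError.
def Pre_solution (needs : List (List Int)) (robot_count : Int) : Prop :=
  needs ≠ [] ∧ (robot_count < 0 ∨ robot_count > ((needs.headD []).length : Int) ∨
    ∀ row ∈ needs,
      ¬((row.drop (needs.headD []).length).any (fun v => decide (v ≠ 0)) = true ∧
        (((row.take (needs.headD []).length).countP (fun v => decide (v ≠ 0)) : Int) ≤ robot_count)))
instance (needs : List (List Int)) (robot_count : Int) : Decidable (Pre_solution needs robot_count) := by
  unfold Pre_solution; infer_instance

def pvWitness_solution : List (List Int) × Int := ([[1, 0], [0, 1], [1, 1]], 1)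

def Spec_solution (needs : List (List Int)) (robot_count : Int) (out : Int) : Prop := out = solution_alt needs robot_count
instance (needs : List (List Int)) (robot_count : Int) (out : Int) : Decidable (Spec_solution needs robot_count out) := by unfold Spec_solution; infer_instance

-- ===== CLAIM (what is proved, stated in full; the proofs are below) =====
def Claim_equal_solution : Prop := ∀ (needs : List (List Int)) (robot_count : Int), Dom_solution needs robot_count → Pre_solution needs robot_count → Spec_solution needs robot_count (solution needs robot_count)

-- ===== LEMMAS AND PROOFS =====

-- mask of an index list
def maskOf (c : List Nat) : Nat := c.foldl (fun s i => s ||| 2 ^ i) 0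
-- boolean picked-list of a mask
def pickedOf (s m : Nat) : List Bool := (List.range m).map s.testBit
-- A's enumeration order of the j-element subsets of idxs (as index lists)
def combsL : List Nat → Nat → List (List Nat)
  | _, 0 => [[]]
  | [], _ + 1 => []
  | i :: rest, j + 1 => ((combsL rest j).map (fun c => i :: c)) ++ combsL rest (j + 1)
def applyI (picked : List Bool) (c : List Nat) : List Bool := c.foldl (fun p i => p.set i true) picked

theorem maskOf_testBit (c : List Nat) (acc p : Nat) :
    (c.foldl (fun s i => s ||| 2 ^ i) acc).testBit p = (acc.testBit p || decide (p ∈ c)) := by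
  induction c generalizing acc with
  | nil => simp
  | cons i rest ih =>
    simp only [List.foldl_cons, ih, Nat.testBit_or, Nat.testBit_two_pow, List.mem_cons]
    by_cases h : p = i <;> by_cases h2 : p ∈ rest <;> simp [h, h2, eq_comm]

theorem sub_iff (x s : Nat) : x &&& s = x ↔ ∀ p, x.testBit p = true → s.testBit p = true := by
  constructor
  · intro h p hp
    have := congrArg (fun t => t.testBit p) h
    simp only [Nat.testBit_and, hp, Bool.true_and] at this
    exact this
  · intro h
    apply Nat.eq_of_testBit_eq
    intro p
    simp only [Nat.testBit_and]
    cases hx : x.testBit p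
    · simp
    · simp [h p hx]

theorem getD_pickedOf (s m i : Nat) (hs : s < 2 ^ m) : (pickedOf s m).getD i false = s.testBit i := by
  unfold pickedOf
  by_cases h : i < m
  · rw [List.getD_eq_getElem?_getD, List.getElem?_map]
    simp [List.getElem?_range h]
  · rw [List.getD_eq_getElem?_getD, List.getElem?_map]
    have : (List.range m).length ≤ i := by simpa using Nat.le_of_not_lt h
    rw [List.getElem?_eq_none this]
    have : s < 2 ^ i := lt_of_lt_of_le hs (Nat.pow_le_pow_right (by norm_num) (Nat.le_of_not_lt h))
    simp [Nat.testBit_eq_false_of_lt this]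

theorem rowMaskB_acc (l : List Int) (i nm : Nat) : rowMaskB i nm l = nm ||| rowMaskB i 0 l := by
  induction l generalizing i nm with
  | nil => simp [rowMaskB]
  | cons v rest ih =>
    show rowMaskB (i + 1) (if v ≠ 0 then nm ||| 2 ^ i else nm) rest
        = nm ||| rowMaskB (i + 1) (if v ≠ 0 then 0 ||| 2 ^ i else 0) rest
    by_cases h : v = 0
    · rw [if_neg (not_not_intro h), if_neg (not_not_intro h)]
      exact ih (i + 1) nm
    · rw [if_pos h, if_pos h, ih (i + 1) (nm ||| 2 ^ i), ih (i + 1) (0 ||| 2 ^ i)]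
      simp [Nat.or_assoc]

theorem canMakeA_mask (need : List Int) (s m : Nat) (hs : s < 2 ^ m) (i : Nat) :
    canMakeA (pickedOf s m) i need = decide (rowMaskB i 0 need &&& s = rowMaskB i 0 need) := by
  induction need generalizing i with
  | nil => simp [canMakeA, rowMaskB]
  | cons v rest ih =>
    by_cases hv : v = 0
    · show (if v = 0 then canMakeA (pickedOf s m) (i + 1) rest else _) = _
      rw [if_pos hv]
      have : rowMaskB i 0 (v :: rest) = rowMaskB (i + 1) 0 rest := by
        simp [rowMaskB, hv]
      rw [this, ih]
    · show (if v = 0 then _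
        else if (pickedOf s m).getD i false = false then false
        else canMakeA (pickedOf s m) (i + 1) rest) = _
      rw [if_neg hv, getD_pickedOf s m i hs]
      have hrm : rowMaskB i 0 (v :: rest) = 2 ^ i ||| rowMaskB (i + 1) 0 rest := by
        show rowMaskB (i + 1) (if v ≠ 0 then 0 ||| 2 ^ i else 0) rest = _
        rw [if_pos hv, rowMaskB_acc]
        simp
      rw [hrm]
      cases hb : s.testBit i
      · rw [if_pos rfl]
        symm
        rw [decide_eq_false_iff_not, sub_iff]
        intro hall
        have hti : (2 ^ i ||| rowMaskB (i + 1) 0 rest).testBit i = true := by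
          simp [Nat.testBit_or, Nat.testBit_two_pow]
        have := hall i hti
        rw [hb] at this
        exact Bool.false_ne_true this
      · rw [if_neg (by simp), ih]
        congr 1
        apply propext
        rw [sub_iff, sub_iff]
        constructor
        · intro h p hp
          rw [Nat.testBit_or, Nat.testBit_two_pow] at hp
          by_cases hip : i = p
          · subst hip
            exact hb
          · simp only [hip, decide_false, Bool.false_or] at hp
            exact h p hp
        · intro h p hp
          exact h p (by rw [Nat.testBit_or, hp, Bool.or_true])

theorem check_aux (s m : Nat) (hs : s < 2 ^ m) (l : List (List Int)) : ∀ (b : Int),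
    l.foldl (fun c need => if canMakeA (pickedOf s m) 0 need then c + 1 else c) b
      = (l.map (fun need => rowMaskB 0 0 need)).foldl
          (fun c nm => if nm &&& s = nm then c + 1 else c) b := by
  induction l with
  | nil => intro b; rfl
  | cons need rest ih =>
    intro b
    simp only [List.map_cons, List.foldl_cons]
    rw [canMakeA_mask need s m hs 0]
    by_cases h : rowMaskB 0 0 need &&& s = rowMaskB 0 0 need
    · rw [if_pos (by simp [h]), if_pos h]
      exact ih _
    · rw [if_neg (by simp [h]), if_neg h]
      exact ih _

theorem check_eq_covered (needs : List (List Int)) (s m : Nat) (hs : s < 2 ^ m) :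
    checkCanMakeCountA needs (pickedOf s m) = coveredB (needs.map (fun need => rowMaskB 0 0 need)) s := by
  unfold checkCanMakeCountA coveredB
  exact check_aux s m hs needs 0

-- step: setting one more picked bit
theorem pickedOf_set (s m i : Nat) (hi : i < m) :
    (pickedOf s m).set i true = pickedOf (s ||| 2 ^ i) m := by
  unfold pickedOf
  apply List.ext_getElem
  · simp
  · intro j hj hj'
    simp only [List.length_set, List.length_map, List.length_range] at hj hj'
    rw [List.getElem_set]
    simp only [List.getElem_map, List.getElem_range, Nat.testBit_or, Nat.testBit_two_pow]
    by_cases h : i = j <;> simp [h]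

theorem applyI_pickedOf (c : List Nat) (m : Nat) (hc : ∀ i ∈ c, i < m) (s : Nat) :
    applyI (pickedOf s m) c = pickedOf (c.foldl (fun t i => t ||| 2 ^ i) s) m := by
  induction c generalizing s with
  | nil => rfl
  | cons i rest ih =>
    simp only [applyI, List.foldl_cons]
    rw [show (pickedOf s m).set i true = pickedOf (s ||| 2 ^ i) m from
      pickedOf_set s m i (hc i (List.mem_cons_self))]
    exact ih (fun j hj => hc j (List.mem_cons_of_mem _ hj)) (s ||| 2 ^ i)

theorem replicate_eq_pickedOf (m : Nat) : List.replicate m false = pickedOf 0 m := by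
  unfold pickedOf
  apply List.ext_getElem <;> simp

-- the DFS enumerates exactly combsL
theorem dfsA_loopA_eq (needs : List (List Int)) (k : Int) (idxs : List Nat) :
    (∀ (depth : Int) (picked : List Bool) (res : Int), depth ≤ k →
      dfsA needs k depth picked res idxs =
        (combsL idxs (k - depth).toNat).foldl
          (fun r c => max r (checkCanMakeCountA needs (applyI picked c))) res) ∧
    (∀ (depth : Int) (picked : List Bool) (res : Int), depth < k →
      loopA needs k depth picked res idxs =
        (combsL idxs (k - depth).toNat).foldl
          (fun r c => max r (checkCanMakeCountA needs (applyI picked c))) res) := by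
  induction idxs with
  | nil =>
    constructor
    · intro depth picked res hle
      rw [dfsA]
      by_cases h : depth = k
      · subst h
        simp [combsL, applyI]
      · have hj : (k - depth).toNat = (k - depth - 1).toNat + 1 := by omega
        rw [if_neg h, loopA, hj]
        simp [combsL]
    · intro depth picked res hlt
      have hj : (k - depth).toNat = (k - depth - 1).toNat + 1 := by omega
      rw [loopA, hj]
      simp [combsL]
  | cons idx rest ih =>
    have ihd := ih.1
    have ihl := ih.2
    have main : ∀ (depth : Int) (picked : List Bool) (res : Int), depth < k →
        loopA needs k depth picked res (idx :: rest) =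
          (combsL (idx :: rest) (k - depth).toNat).foldl
            (fun r c => max r (checkCanMakeCountA needs (applyI picked c))) res := by
      intro depth picked res hlt
      have hj : (k - depth).toNat = (k - (depth + 1)).toNat + 1 := by omega
      have step : dfsA needs k (depth + 1) (picked.set idx true) res rest =
          (combsL rest (k - (depth + 1)).toNat).foldl
            (fun r c => max r (checkCanMakeCountA needs (applyI picked (idx :: c)))) res := by
        rw [ihd (depth + 1) (picked.set idx true) res (by omega)]
        rfl
      rw [loopA, hj]
      simp only [combsL]
      rw [List.foldl_append, List.foldl_map, ← step, ← hj]
      exact ihl depth picked _ hlt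
    constructor
    · intro depth picked res hle
      rw [dfsA]
      by_cases h : depth = k
      · subst h
        simp [combsL, applyI]
      · rw [if_neg h]
        exact main depth picked res (lt_of_le_of_ne hle h)
    · exact main

-- combsL is a permutation of sublistsLen
theorem combsL_perm (l : List Nat) (j : Nat) : (combsL l j).Perm (List.sublistsLen j l) := by
  induction l generalizing j with
  | nil =>
    cases j with
    | zero => simp [combsL]
    | succ j => simp [combsL]
  | cons i rest ih =>
    cases j with
    | zero => simp [combsL]
    | succ j =>
      rw [combsL, List.sublistsLen_succ_cons]
      exact (List.Perm.append ((ih j).map _) (ih (j + 1))).trans List.perm_append_comm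

theorem mem_combsL {l : List Nat} {j : Nat} {c : List Nat} :
    c ∈ combsL l j ↔ c.Sublist l ∧ c.length = j := by
  rw [(combsL_perm l j).mem_iff, List.mem_sublistsLen]

-- popcount counts the set bits below m
theorem popcnt_succ (t : Nat) (ht : 0 < t) : popcntB t = t % 2 + popcntB (t / 2) := by
  cases t with
  | zero => omega
  | succ n => rw [popcntB]

theorem testBit_zero_fun : (Nat.testBit 0) = fun _ => false := by
  funext i
  exact Nat.zero_testBit i

theorem popcnt_filter (m : Nat) : ∀ t, t < 2 ^ m →
    popcntB t = ((List.range m).filter t.testBit).length := by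
  induction m with
  | zero =>
    intro t ht
    interval_cases t
    simp [popcntB]
  | succ m ih =>
    intro t ht
    by_cases h0 : t = 0
    · subst h0
      rw [testBit_zero_fun]
      simp [popcntB]
    · rw [popcnt_succ t (Nat.pos_of_ne_zero h0)]
      rw [List.range_succ_eq_map, List.filter_cons, List.filter_map]
      have ht2 : t / 2 < 2 ^ m := by
        rw [pow_succ] at ht
        omega
      have hcomp : (t.testBit ∘ Nat.succ) = (t / 2).testBit := by
        funext i
        simp [Function.comp, Nat.testBit_add_one]
      rw [hcomp, Nat.testBit_zero]
      by_cases hp : t % 2 = 1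
      · simp only [hp, decide_true, if_pos, List.length_cons, List.length_map,
          ← ih (t / 2) ht2]
        omega
      · have h2 : t % 2 = 0 := by omega
        simp only [hp, decide_false, Bool.false_eq_true, if_false, List.length_map,
          ← ih (t / 2) ht2]
        omega

theorem maskOf_lt (c : List Nat) (m : Nat) (hc : ∀ i ∈ c, i < m) : maskOf c < 2 ^ m := by
  unfold maskOf
  have : ∀ acc, acc < 2 ^ m → c.foldl (fun s i => s ||| 2 ^ i) acc < 2 ^ m := by
    induction c with
    | nil => intro acc h; simpa using h
    | cons i rest ih =>
      intro acc h
      simp only [List.foldl_cons]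
      apply ih (fun j hj => hc j (List.mem_cons_of_mem _ hj))
      exact Nat.or_lt_two_pow h (Nat.pow_lt_pow_right (by norm_num) (hc i List.mem_cons_self))
  exact this 0 (Nat.two_pow_pos m)

theorem testBit_maskOf (c : List Nat) (p : Nat) : (maskOf c).testBit p = decide (p ∈ c) := by
  unfold maskOf
  rw [maskOf_testBit]
  simp [Nat.zero_testBit]

theorem filter_mem_of_sublist {c l : List Nat} (h : c.Sublist l) (hl : l.Nodup) :
    l.filter (fun i => decide (i ∈ c)) = c := by
  induction h with
  | slnil => rfl
  | @cons c l a h ih =>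
    have ha : a ∉ l := (List.nodup_cons.mp hl).1
    have hac : a ∉ c := fun hx => ha (h.subset hx)
    rw [List.filter_cons]
    simp only [hac, decide_false, Bool.false_eq_true, if_false]
    exact ih (List.nodup_cons.mp hl).2
  | @cons₂ c l a h ih =>
    have ha : a ∉ l := (List.nodup_cons.mp hl).1
    rw [List.filter_cons, if_pos (by simp)]
    have hcongr : List.filter (fun i => decide (i ∈ a :: c)) l
        = List.filter (fun i => decide (i ∈ c)) l :=
      List.filter_congr (fun i hi => by
        simp only [decide_eq_decide, List.mem_cons]
        constructor
        · rintro (rfl | hx)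
          · exact absurd hi ha
          · exact hx
        · exact Or.inr)
    rw [hcongr, ih (List.nodup_cons.mp hl).2]

theorem mem_maskList (m j : Nat) (t : Nat) :
    t ∈ (combsL (List.range m) j).map maskOf ↔ t < 2 ^ m ∧ popcntB t = j := by
  constructor
  · intro ht
    rcases List.mem_map.mp ht with ⟨c, hc, rfl⟩
    rcases mem_combsL.mp hc with ⟨hsub, hlen⟩
    have hcm : ∀ i ∈ c, i < m := fun i hi => List.mem_range.mp (hsub.subset hi)
    have hlt := maskOf_lt c m hcm
    refine ⟨hlt, ?_⟩
    rw [popcnt_filter m _ hlt]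
    rw [List.filter_congr (fun i _ => by rw [testBit_maskOf])]
    rw [filter_mem_of_sublist hsub (List.nodup_range)]
    exact hlen
  · rintro ⟨hlt, hpc⟩
    refine List.mem_map.mpr ⟨(List.range m).filter t.testBit, ?_, ?_⟩
    · apply mem_combsL.mpr
      refine ⟨List.filter_sublist, ?_⟩
      rw [← popcnt_filter m t hlt, hpc]
    · apply Nat.eq_of_testBit_eq
      intro p
      rw [testBit_maskOf]
      by_cases hp : p < m
      · simp only [List.mem_filter, List.mem_range, decide_eq_true_eq]
        by_cases hb : t.testBit p
        · simp [hp, hb]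
        · simp [hp, hb]
      · have : t.testBit p = false :=
          Nat.testBit_eq_false_of_lt (lt_of_lt_of_le hlt (Nat.pow_le_pow_right (by norm_num) (Nat.le_of_not_lt hp)))
        simp [this]

theorem nodup_maskList (m j : Nat) : ((combsL (List.range m) j).map maskOf).Nodup := by
  have hnodup : (combsL (List.range m) j).Nodup :=
    ((combsL_perm (List.range m) j).nodup_iff).mpr (List.nodup_sublistsLen j List.nodup_range)
  apply hnodup.map_on
  intro c1 h1 c2 h2 heq
  rcases mem_combsL.mp h1 with ⟨hs1, -⟩
  rcases mem_combsL.mp h2 with ⟨hs2, -⟩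
  have : ∀ i, (i ∈ c1) ↔ (i ∈ c2) := by
    intro i
    have := congrArg (fun t => Nat.testBit t i) heq
    simpa [testBit_maskOf] using this
  calc c1 = (List.range m).filter (fun i => decide (i ∈ c1)) := (filter_mem_of_sublist hs1 List.nodup_range).symm
    _ = (List.range m).filter (fun i => decide (i ∈ c2)) := List.filter_congr (fun i _ => by simp [this i])
    _ = c2 := filter_mem_of_sublist hs2 List.nodup_range

theorem maskList_perm (m j : Nat) :
    ((combsL (List.range m) j).map maskOf).Perm
      ((List.range (2 ^ m)).filter (fun s => popcntB s = j)) := by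
  apply List.perm_of_nodup_nodup_toFinset_eq (nodup_maskList m j)
    (List.nodup_range.filter _)
  apply Finset.ext
  intro t
  simp only [List.mem_toFinset, mem_maskList, List.mem_filter, List.mem_range, decide_eq_true_eq]

theorem foldl_max_congr {α : Type} (H1 H2 : α → Int) (l : List α) (h : ∀ s ∈ l, H1 s = H2 s) (b : Int) :
    l.foldl (fun r s => max r (H1 s)) b = l.foldl (fun r s => max r (H2 s)) b := by
  induction l generalizing b with
  | nil => rfl
  | cons x rest ih =>
    simp only [List.foldl_cons]
    rw [h x List.mem_cons_self]
    exact ih (fun s hs => h s (List.mem_cons_of_mem _ hs)) _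

-- k below every depth: the DFS never reaches the depth test and returns res
theorem dfsA_loopA_lt (needs : List (List Int)) (k : Int) (idxs : List Nat) :
    (∀ (depth : Int) (picked : List Bool) (res : Int), k < depth →
      dfsA needs k depth picked res idxs = res) ∧
    (∀ (depth : Int) (picked : List Bool) (res : Int), k < depth →
      loopA needs k depth picked res idxs = res) := by
  induction idxs with
  | nil =>
    constructor
    · intro depth picked res hlt
      rw [dfsA, if_neg (by omega), loopA]
    · intro depth picked res hlt
      rw [loopA]
  | cons idx rest ih =>
    have main : ∀ (depth : Int) (picked : List Bool) (res : Int), k < depth →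
        loopA needs k depth picked res (idx :: rest) = res := by
      intro depth picked res hlt
      rw [loopA, ih.1 (depth + 1) (picked.set idx true) res (by omega),
        ih.2 depth picked res hlt]
    exact ⟨fun depth picked res hlt => by
      rw [dfsA, if_neg (by omega)]
      exact main depth picked res hlt, main⟩

theorem foldl_id {α : Type} (l : List α) (f : Int → α → Int) (b : Int)
    (h : ∀ (b : Int) (x : α), x ∈ l → f b x = b) : l.foldl f b = b := by
  induction l generalizing b with
  | nil => rfl
  | cons x rest ih =>
    rw [List.foldl_cons, h b x List.mem_cons_self]
    exact ih b (fun b y hy => h b y (List.mem_cons_of_mem _ hy))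

-- B's running-max loop over the popcount filter
theorem bfold (masks : List Nat) (k : Int) (k' : Nat) (hkk : k = (k' : Int)) (l : List Nat) :
    ∀ b : Int,
      l.foldl (fun best s => if (popcntB s : Int) ≠ k then best
        else (let covered := coveredB masks s; if covered > best then covered else best)) b
      = (l.filter (fun s => popcntB s = k')).foldl (fun r s => max r (coveredB masks s)) b := by
  induction l with
  | nil => intro b; rfl
  | cons s rest ih =>
    intro b
    rw [List.foldl_cons, List.filter_cons]
    by_cases h : popcntB s = k'
    · rw [if_neg (show ¬((popcntB s : Int) ≠ k) by omega)]
      have hmax : (let covered := coveredB masks s; if covered > b then covered else b)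
          = max b (coveredB masks s) := by
        simp only []
        split_ifs with h2 <;> omega
      rw [hmax, if_pos (show decide (popcntB s = k') = true by simp [h]), List.foldl_cons]
      exact ih _
    · rw [if_pos (show (popcntB s : Int) ≠ k by omega),
        if_neg (show ¬(decide (popcntB s = k') = true) by simp [h])]
      exact ih _

theorem solution_eq_alt (needs : List (List Int)) (k : Int) :
    solution needs k = solution_alt needs k := by
  unfold solution solution_alt
  set m := ((PySem.List.pyGet? needs 0).getD []).length with hm
  by_cases hk : k > (m : Int)
  · simp [hk]
  · simp only [hk, if_false, ite_false]
    by_cases hneg : k < 0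
    · rw [(dfsA_loopA_lt needs k (List.range' 0 m)).1 0 (List.replicate m false) 0 hneg]
      rw [foldl_id]
      intro b s _hs
      rw [if_pos (by have := Int.natCast_nonneg (popcntB s); omega)]
    · -- 0 ≤ k ≤ m
      have hk0 : (0 : Int) ≤ k := by omega
      set k' := k.toNat with hk'
      have hkk : k = (k' : Int) := by omega
      -- A side: fold of the running max over the masks of A's enumeration order
      have hA : dfsA needs k 0 (List.replicate m false) 0 (List.range' 0 m)
          = ((combsL (List.range m) k').map maskOf).foldl
              (fun r s => max r (checkCanMakeCountA needs (pickedOf s m))) 0 := by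
        rw [← List.range_eq_range',
          (dfsA_loopA_eq needs k (List.range m)).1 0 (List.replicate m false) 0 hk0,
          List.foldl_map]
        have hsub : (k - 0).toNat = k' := by omega
        rw [hsub]
        apply foldl_max_congr
        intro c hc
        rcases mem_combsL.mp hc with ⟨hs, -⟩
        have hcm : ∀ i ∈ c, i < m := fun i hi => List.mem_range.mp (hs.subset hi)
        rw [replicate_eq_pickedOf, applyI_pickedOf c m hcm 0]
        rfl
      -- B side: fold of the running max over the popcount-filtered range
      have hB : (List.range (2 ^ m)).foldl
            (fun best s => if (popcntB s : Int) ≠ k then best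
              else (let covered := coveredB (needs.map (fun need => rowMaskB 0 0 need)) s;
                if covered > best then covered else best)) 0
          = ((List.range (2 ^ m)).filter (fun s => popcntB s = k')).foldl
              (fun r s => max r (checkCanMakeCountA needs (pickedOf s m))) 0 := by
        rw [bfold (needs.map (fun need => rowMaskB 0 0 need)) k k' hkk]
        apply foldl_max_congr
        intro s hsmem
        have hslt : s < 2 ^ m := List.mem_range.mp (List.mem_filter.mp hsmem).1
        rw [check_eq_covered needs s m hslt]
      rw [hA, hB]
      exact List.Perm.foldl_eq' (maskList_perm m k')
        (fun x _hx y _hy z => max_right_comm z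
          (checkCanMakeCountA needs (pickedOf x m)) (checkCanMakeCountA needs (pickedOf y m))) 0

-- ===== VERDICT (by name: the statement is the Claim_ definition above) =====
theorem solution_spec : Claim_equal_solution := by
  intro needs robot_count _hdom _hpre
  unfold Spec_solution
  exact solution_eq_alt needs robot_count
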